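-- pv_equiv track=rewrite | github.com/EdwardGa0/CP | Codeforces/Contests/Div2/708/C2.py | solve
-- ===== SOURCE A (Python) =====
-- def solve(n):
--     if n == 4:
--         return ([1, 1, 2])
--     if n & 1:
--         return([1, (n-1)//2, (n-1)//2])
--     else:
--         if (n-2)//2 & 1:
--             return([i*2 for i in solve(n//2)])
--         else:
--             return([2, (n-2)//2, (n-2)//2])
-- ===== SOURCE B (Python) =====
-- def solve(n):
--     mult = 1
--     while n % 4 == 0 and n != 4:
--         n //= 2
--         mult *= 2
--     if n == 4:
--         base = [1, 1, 2]
--     elif n % 2: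
--         base = [1, (n - 1) // 2, (n - 1) // 2]
--     else:
--         base = [2, (n - 2) // 2, (n - 2) // 2]
--     return [x * mult for x in base]
-- ===== Notes on version B (the rewrite author's own statement) =====
-- stated objective: simpler
-- what changed: Replaces A's recursion (which rebuilds and doubles the whole triple at every level) with one while loop that halves n while accumulating a power-of-two multiplier, then scales the base triple once at the end.
-- outside the precondition, e.g. on solve(0): A raises RecursionError, B does not finish within the time limit
import Mathlib
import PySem

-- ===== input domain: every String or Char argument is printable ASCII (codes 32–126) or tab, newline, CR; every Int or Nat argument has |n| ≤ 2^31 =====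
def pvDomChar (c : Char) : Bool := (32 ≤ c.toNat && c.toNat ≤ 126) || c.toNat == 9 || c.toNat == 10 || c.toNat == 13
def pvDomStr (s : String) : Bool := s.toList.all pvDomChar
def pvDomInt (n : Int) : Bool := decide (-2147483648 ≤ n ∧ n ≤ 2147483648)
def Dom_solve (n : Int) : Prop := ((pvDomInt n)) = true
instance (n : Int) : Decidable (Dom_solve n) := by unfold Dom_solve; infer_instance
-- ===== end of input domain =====

-- B replaces A's recursion (which rebuilds the doubled triple at every level) by one loop that
-- strips factors of 2 while accumulating a multiplier, then scales the base triple once: simpler.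

-- ===== PORT A =====
-- fuel makes the recursion total; n.natAbs + 1 always suffices (|n| at least halves per call).
-- Python `n & 1` is ported as `PySem.Int.mod n 2 == 1` (bitwise AND with 1 = floor-mod 2, exact for all ints).
def solveGoA : Nat → Int → List Int
  | 0, _ => []
  | fuel + 1, n =>
    if n == 4 then [1, 1, 2]
    else if PySem.Int.mod n 2 == 1 then
      [1, PySem.Int.floordiv (n - 1) 2, PySem.Int.floordiv (n - 1) 2]
    else if PySem.Int.mod (PySem.Int.floordiv (n - 2) 2) 2 == 1 then
      (solveGoA fuel (PySem.Int.floordiv n 2)).map (fun i => i * 2)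
    else
      [2, PySem.Int.floordiv (n - 2) 2, PySem.Int.floordiv (n - 2) 2]

def solve (n : Int) : List Int := solveGoA (n.natAbs + 1) n

-- ===== PORT B =====
-- the while loop of Source B, as fuel recursion over the state (n, mult); same fuel bound suffices.
def loopGoB : Nat → Int → Int → Int × Int
  | 0, n, mult => (n, mult)
  | fuel + 1, n, mult =>
    if PySem.Int.mod n 4 == 0 && n != 4 then
      loopGoB fuel (PySem.Int.floordiv n 2) (mult * 2)
    else (n, mult)

def baseB (n : Int) : List Int :=
  if n == 4 then [1, 1, 2]
  else if PySem.Int.mod n 2 == 1 then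
    [1, PySem.Int.floordiv (n - 1) 2, PySem.Int.floordiv (n - 1) 2]
  else
    [2, PySem.Int.floordiv (n - 2) 2, PySem.Int.floordiv (n - 2) 2]

def solve_alt (n : Int) : List Int :=
  let p := loopGoB (n.natAbs + 1) n 1
  (baseB p.1).map (fun x => x * p.2)

-- ===== PRECONDITION & SPEC =====
-- Pre_ excludes n = 0, on which A recurses forever (RecursionError); B's loop also never terminates there.
def Pre_solve (n : Int) : Prop := n ≠ 0
instance (n : Int) : Decidable (Pre_solve n) := by unfold Pre_solve; infer_instance
def pvWitness_solve : Int := (6)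

def Spec_solve (n : Int) (out : List Int) : Prop := out = solve_alt n
instance (n : Int) (out : List Int) : Decidable (Spec_solve n out) := by unfold Spec_solve; infer_instance

-- ===== CLAIM (what is proved, stated in full; the proofs are below) =====
def Claim_equal_solve : Prop := ∀ (n : Int), Dom_solve n → Pre_solve n → Spec_solve n (solve n)

-- ===== LEMMAS AND PROOFS =====

theorem pmod2 (a : Int) : PySem.Int.mod a 2 = a % 2 := PySem.Int.mod_eq_emod_of_pos (by norm_num)
theorem pmod4 (a : Int) : PySem.Int.mod a 4 = a % 4 := PySem.Int.mod_eq_emod_of_pos (by norm_num)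
theorem pdiv2 (a : Int) : PySem.Int.floordiv a 2 = a / 2 := PySem.Int.floordiv_eq_ediv_of_pos (by norm_num)

theorem solveGoA_zero : ∀ f : Nat, solveGoA f 0 = [] := by
  intro f
  induction f with
  | zero => rfl
  | succ f ih => simp [solveGoA, ih]

theorem natAbs_half_lt (n : Int) (hn : n ≠ 0) (he : n % 2 = 0) :
    (PySem.Int.floordiv n 2).natAbs < n.natAbs := by
  rw [pdiv2]; omega

theorem half_ne_zero (n : Int) (hn : n ≠ 0) (he : n % 2 = 0) : PySem.Int.floordiv n 2 ≠ 0 := by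
  rw [pdiv2]; omega

-- fuel stability for A's port
theorem solveGoA_stable (k : Nat) :
    ∀ n : Int, n.natAbs ≤ k → ∀ f1 f2 : Nat, n.natAbs < f1 → n.natAbs < f2 →
      solveGoA f1 n = solveGoA f2 n := by
  induction k with
  | zero =>
    intro n hk f1 f2 h1 h2
    have hn0 : n = 0 := by omega
    subst hn0
    rw [solveGoA_zero, solveGoA_zero]
  | succ k ih =>
    intro n hk f1 f2 h1 h2
    obtain ⟨a, rfl⟩ : ∃ a, f1 = a + 1 := ⟨f1 - 1, by omega⟩
    obtain ⟨b, rfl⟩ : ∃ b, f2 = b + 1 := ⟨f2 - 1, by omega⟩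
    simp only [solveGoA]
    split_ifs with h4 hodd hrec
    · rfl
    · rfl
    · by_cases hn0 : n = 0
      · subst hn0
        norm_num [pdiv2]
        rw [solveGoA_zero, solveGoA_zero]
      · have he : n % 2 = 0 := by
          simp only [pmod2, beq_iff_eq] at hodd; omega
        have hlt := natAbs_half_lt n hn0 he
        rw [ih (PySem.Int.floordiv n 2) (by omega) a b (by omega) (by omega)]
    · rfl

theorem loopGoB_stable (k : Nat) :
    ∀ (n mult : Int), n ≠ 0 → n.natAbs ≤ k → ∀ f1 f2 : Nat, n.natAbs < f1 → n.natAbs < f2 →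
      loopGoB f1 n mult = loopGoB f2 n mult := by
  induction k with
  | zero => intro n mult hn hk _ _ _ _; omega
  | succ k ih =>
    intro n mult hn hk f1 f2 h1 h2
    obtain ⟨a, rfl⟩ : ∃ a, f1 = a + 1 := ⟨f1 - 1, by omega⟩
    obtain ⟨b, rfl⟩ : ∃ b, f2 = b + 1 := ⟨f2 - 1, by omega⟩
    simp only [loopGoB]
    split_ifs with hg
    · have h4 : n % 4 = 0 := by
        simp only [Bool.and_eq_true, beq_iff_eq, pmod4] at hg
        exact hg.1
      have he : n % 2 = 0 := by omega
      have hlt := natAbs_half_lt n hn he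
      exact ih (PySem.Int.floordiv n 2) (mult * 2) (half_ne_zero n hn he) (by omega) a b
        (by omega) (by omega)
    · rfl

-- A's recursion guard (n ≠ 4, n even, (n-2)//2 odd) coincides with B's loop guard (n % 4 = 0, n ≠ 4)
theorem guard_iff (n : Int) :
    (¬ n = 4 ∧ ¬ n % 2 = 1 ∧ (n - 2) / 2 % 2 = 1) ↔ (n % 4 = 0 ∧ ¬ n = 4) := by
  omega

-- main induction: A's result scaled by mult equals B's loop result finished with baseB
theorem main_aux (k : Nat) :
    ∀ (n mult : Int), n ≠ 0 → n.natAbs ≤ k →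
      (solveGoA (n.natAbs + 1) n).map (fun i => i * mult)
        = (baseB (loopGoB (n.natAbs + 1) n mult).1).map
            (fun x => x * (loopGoB (n.natAbs + 1) n mult).2) := by
  induction k with
  | zero => intro n mult hn hk; omega
  | succ k ih =>
    intro n mult hn hk
    by_cases hg : n % 4 = 0 ∧ ¬ n = 4
    · -- both recurse on n / 2
      have he : n % 2 = 0 := by omega
      have hA := (guard_iff n).mpr hg
      have hlt := natAbs_half_lt n hn he
      have hhz := half_ne_zero n hn he
      set m := PySem.Int.floordiv n 2 with hm
      have eA : solveGoA (n.natAbs + 1) n = (solveGoA n.natAbs m).map (fun i => i * 2) := by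
        simp only [solveGoA]
        rw [if_neg (by simp only [beq_iff_eq]; exact hA.1),
            if_neg (by simp only [pmod2, beq_iff_eq]; exact hA.2.1),
            if_pos (by simp only [pmod2, pdiv2, beq_iff_eq]; exact hA.2.2)]
      have eB : loopGoB (n.natAbs + 1) n mult = loopGoB n.natAbs m (mult * 2) := by
        simp only [loopGoB]
        rw [if_pos (by simp only [Bool.and_eq_true, beq_iff_eq, bne_iff_ne, pmod4]
                       exact ⟨hg.1, hg.2⟩)]
      have sA : solveGoA n.natAbs m = solveGoA (m.natAbs + 1) m :=
        solveGoA_stable k m (by omega) _ _ (by omega) (by omega)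
      have sB : loopGoB n.natAbs m (mult * 2) = loopGoB (m.natAbs + 1) m (mult * 2) :=
        loopGoB_stable k m (mult * 2) hhz (by omega) _ _ (by omega) (by omega)
      rw [eA, eB, sA, sB, List.map_map]
      have hmm := ih m (mult * 2) hhz (by omega)
      rw [← hmm]
      congr 1
      funext x
      simp only [Function.comp_apply]
      ring
    · -- both stop: A returns its base triple, B's loop exits immediately
      have hB : loopGoB (n.natAbs + 1) n mult = (n, mult) := by
        simp only [loopGoB]
        rw [if_neg]
        simp only [Bool.and_eq_true, beq_iff_eq, bne_iff_ne, pmod4]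
        intro h
        exact hg ⟨h.1, h.2⟩
      have hA' := (guard_iff n).not.mpr hg
      rw [hB]
      simp only [solveGoA, baseB, pmod2, pdiv2, beq_iff_eq]
      by_cases h4 : n = 4
      · simp [h4]
      · by_cases hodd : n % 2 = 1
        · simp [h4, hodd]
        · have hrec : ¬ (n - 2) / 2 % 2 = 1 := by omega
          simp [h4, hodd, hrec]

-- ===== VERDICT (by name: the statement is the Claim_ definition above) =====
theorem solve_spec : Claim_equal_solve := by
  intro n _ hn
  unfold Spec_solve solve solve_alt
  have h := main_aux n.natAbs n 1 hn (le_refl _)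
  simpa using h
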